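-- pv_equiv track=rewrite | github.com/nyu058/searchEngine | models/booleanmodel.py | wildcard
-- ===== SOURCE A (Python) =====
-- def wildcard(token, index):
--     result=[]
--     count=0
--     for word in index:
--         if word[0][0][:len(token)] == token:
--             result.append('(')
--             result.append(word[0][0])
--             result.append('or')
--             count+=1
--     result.pop()
--     for i in range(count):
--         result.append(')')
--     return result
-- ===== SOURCE B (Python) =====
-- def wildcard(token, index):
--     # Build the nested query back-to-front: start from the innermost (last
--     # matching) word with all the closing parens, then wrap each earlier match
--     # around it. No separator is ever emitted and then dropped.
--     ms = [word[0][0] for word in index if word[0][0].startswith(token)]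
--     out = ['(', ms[-1]] + [')'] * len(ms)   # IndexError when nothing matches
--     for w in reversed(ms[:-1]):
--         out = ['(', w, 'or'] + out
--     return out
-- ===== Notes on version B (the rewrite author's own statement) =====
-- stated objective: alternative
-- what changed: B builds the nested query back-to-front: it starts from the innermost term ['(', last_match] plus all closing parens and wraps each earlier match around it in reverse, so no trailing 'or' is ever emitted and A's count/result.pop() bookkeeping disappears (ms[-1] raises the same IndexError when nothing matches).
import Mathlib
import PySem

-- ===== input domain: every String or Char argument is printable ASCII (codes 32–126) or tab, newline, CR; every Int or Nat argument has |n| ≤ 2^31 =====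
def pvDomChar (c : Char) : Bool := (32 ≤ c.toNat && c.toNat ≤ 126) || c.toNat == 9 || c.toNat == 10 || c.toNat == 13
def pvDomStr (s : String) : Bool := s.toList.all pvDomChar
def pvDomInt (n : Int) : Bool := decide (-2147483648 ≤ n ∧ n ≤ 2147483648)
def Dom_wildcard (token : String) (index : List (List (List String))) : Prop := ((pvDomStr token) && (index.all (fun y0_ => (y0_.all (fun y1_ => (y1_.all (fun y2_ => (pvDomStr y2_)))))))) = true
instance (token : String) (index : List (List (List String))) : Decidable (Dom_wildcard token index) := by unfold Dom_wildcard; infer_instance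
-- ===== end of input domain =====

-- B builds the nested query back-to-front from the innermost matching term instead of A's
-- emit-then-pop forward loop; objective: alternative (same output, same IndexError inputs,
-- which Pre_ excludes).

-- ===== PORT A =====
-- word[0][0] via pyGetD (defaults unreachable under Pre_, which guarantees both indices in range)
def wildcard (token : String) (index : List (List (List String))) : List String :=
  let st := index.foldl (fun (st : List String × Nat) word =>
      let w := PySem.List.pyGetD (PySem.List.pyGetD word 0 []) 0 ""
      if PySem.Str.slice w none (some (PySem.Str.len token)) = token then
        (st.1 ++ ["("] ++ [w] ++ ["or"], st.2 + 1)
      else st) ([], 0)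
  match PySem.List.pop? st.1 (-1) with   -- result.pop(); none = IndexError, excluded by Pre_
  | none => []
  | some (_, rest) =>
      (PySem.List.pyRange 0 (st.2 : Int) 1).foldl (fun r _ => r ++ [")"]) rest

-- ===== PORT B =====
def wildcard_alt (token : String) (index : List (List (List String))) : List String :=
  let ms := index.filterMap (fun word =>
      let w := PySem.List.pyGetD (PySem.List.pyGetD word 0 []) 0 ""
      if PySem.Str.startswith w token then some w else none)
  match PySem.List.pyGet? ms (-1) with   -- ms[-1]; none = IndexError, excluded by Pre_
  | none => []
  | some last =>
      (PySem.List.slice ms none (some (-1))).reverse.foldl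
        (fun out w => ["(", w, "or"] ++ out)
        (["(", last] ++ List.replicate ms.length ")")

-- ===== PRECONDITION & SPEC =====
-- Pre_ excludes exactly the inputs where the Python A raises IndexError: an entry whose
-- word[0][0] does not exist, or no word matching the prefix (then result.pop() pops from []).
def Pre_wildcard (token : String) (index : List (List (List String))) : Prop :=
  ((index.all (fun word => !word.isEmpty && !(word.headD []).isEmpty)) &&
   (index.any (fun word => PySem.Str.startswith ((word.headD []).headD "") token))) = true
instance (token : String) (index : List (List (List String))) : Decidable (Pre_wildcard token index) := by unfold Pre_wildcard; infer_instance

def pvWitness_wildcard : String × List (List (List String)) := ("a", [[["ab"]], [["b"]]])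

def Spec_wildcard (token : String) (index : List (List (List String))) (out : List String) : Prop := out = wildcard_alt token index
instance (token : String) (index : List (List (List String))) (out : List String) : Decidable (Spec_wildcard token index out) := by unfold Spec_wildcard; infer_instance

-- ===== CLAIM (what is proved, stated in full; the proofs are below) =====
def Claim_equal_wildcard : Prop := ∀ (token : String) (index : List (List (List String))), Dom_wildcard token index → Pre_wildcard token index → Spec_wildcard token index (wildcard token index)

-- ===== LEMMAS AND PROOFS =====

-- the matching words, in index order
def pvMatches (token : String) (index : List (List (List String))) : List String :=
  index.filterMap (fun word =>
    let w := PySem.List.pyGetD (PySem.List.pyGetD word 0 []) 0 ""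
    if PySem.Str.startswith w token then some w else none)

-- B's output shape before the closing parens: all matches joined by 'or', no trailing one
def pvFmt : List String → List String
  | [] => []
  | [m] => ["(", m]
  | m :: rest => ["(", m, "or"] ++ pvFmt rest

theorem pyGetD_zero_headD {α : Type} (xs : List α) (d : α) :
    PySem.List.pyGetD xs 0 d = xs.headD d := by
  cases xs <;> simp [PySem.List.pyGetD, PySem.List.pyGet?, PySem.List.pyIdx?]

-- A's slice test "w[:len(token)] == token" is the prefix test B uses.
theorem slice_eq_iff_startswith (w token : String) :
    (PySem.Str.slice w none (some (PySem.Str.len token)) = token) ↔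
      PySem.Str.startswith w token = true := by
  rw [← String.toList_inj, PySem.Str.toList_slice, PySem.Chars.slice_eq_listSlice,
      PySem.Str.len_eq, PySem.Str.startswith_eq, PySem.Chars.startswith_iff]
  rw [PySem.List.slice_to_natCast, List.prefix_iff_eq_take]
  exact eq_comm

-- A's fused loop = (matches rendered as '(',w,'or' triples, their number)
theorem a_loop_eq (token : String) (index : List (List (List String))) (res : List String) (cnt : Nat) :
    index.foldl (fun (st : List String × Nat) word =>
      let w := PySem.List.pyGetD (PySem.List.pyGetD word 0 []) 0 ""
      if PySem.Str.slice w none (some (PySem.Str.len token)) = token then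
        (st.1 ++ ["("] ++ [w] ++ ["or"], st.2 + 1)
      else st) (res, cnt)
    = (res ++ (pvMatches token index).flatMap (fun w => ["(", w, "or"]),
       cnt + (pvMatches token index).length) := by
  induction index generalizing res cnt with
  | nil => simp [pvMatches]
  | cons word rest ih =>
    simp only [List.foldl_cons, pvMatches, List.filterMap_cons] at *
    by_cases h : PySem.Str.startswith (PySem.List.pyGetD (PySem.List.pyGetD word 0 []) 0 "") token = true
    · rw [if_pos ((slice_eq_iff_startswith _ _).mpr h)]
      simp only [h, ih]
      simp [List.append_assoc]
      omega
    · rw [if_neg (fun hc => h ((slice_eq_iff_startswith _ _).mp hc))]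
      simp only [h, ih]
      simp

-- the rendered triples are pvFmt plus the trailing 'or' A pops
theorem flatMap_eq_fmt_or (ms : List String) (h : ms ≠ []) :
    ms.flatMap (fun w => ["(", w, "or"]) = pvFmt ms ++ ["or"] := by
  induction ms with
  | nil => exact absurd rfl h
  | cons m rest ih =>
    cases rest with
    | nil => simp [pvFmt]
    | cons r rs => simp only [List.flatMap_cons, ih (by simp), pvFmt]; simp

-- the trailing 'for i in range(count): result.append(")")' appends count ')'s
theorem range_append_eq_replicate (cnt : Nat) (rest : List String) :
    (PySem.List.pyRange 0 (cnt : Int) 1).foldl (fun r _ => r ++ [")"]) rest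
      = rest ++ List.replicate cnt ")" := by
  rw [PySem.List.pyRange_zero_natCast, PySem.List.foldl_append_singleton_eq_map (fun _ => ")")]
  simp [Function.comp_def, List.map_const']

theorem pvFmt_cons (m : String) (rest : List String) (h : rest ≠ []) :
    pvFmt (m :: rest) = ["(", m, "or"] ++ pvFmt rest := by
  cases rest with
  | nil => exact absurd rfl h
  | cons r rs => simp [pvFmt]

-- B's wrap-around loop, read back-to-front, produces pvFmt directly
theorem b_foldr_eq (last : String) (init r : List String) :
    init.foldr (fun w out => ["(", w, "or"] ++ out) (["(", last] ++ r)
      = pvFmt (init ++ [last]) ++ r := by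
  induction init with
  | nil => simp [pvFmt]
  | cons i is ih =>
    have h2 : pvFmt ((i :: is) ++ [last]) = ["(", i, "or"] ++ pvFmt (is ++ [last]) := by
      rw [List.cons_append]; exact pvFmt_cons _ _ (by simp)
    rw [List.foldr_cons, ih, h2]
    simp

-- the inline filter in B's port is pvMatches
theorem pvMatches_eq (token : String) (index : List (List (List String))) :
    (index.filterMap (fun word =>
      let w := PySem.List.pyGetD (PySem.List.pyGetD word 0 []) 0 ""
      if PySem.Str.startswith w token then some w else none)) = pvMatches token index := rfl

-- under Pre_ there is at least one match
theorem matches_ne_nil (token : String) (index : List (List (List String)))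
    (hp : Pre_wildcard token index) : pvMatches token index ≠ [] := by
  unfold Pre_wildcard at hp
  simp only [Bool.and_eq_true, List.any_eq_true] at hp
  obtain ⟨_, word, hmem, hsw⟩ := hp
  intro hnil
  have : (word.headD []).headD "" ∈ pvMatches token index := by
    unfold pvMatches
    refine List.mem_filterMap.mpr ⟨word, hmem, ?_⟩
    rw [pyGetD_zero_headD, pyGetD_zero_headD, if_pos hsw]
  rw [hnil] at this
  exact absurd this (List.not_mem_nil)

-- ===== VERDICT (by name: the statement is the Claim_ definition above) =====
theorem wildcard_spec : Claim_equal_wildcard := by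
  intro token index _ hp
  unfold Spec_wildcard wildcard wildcard_alt
  rw [a_loop_eq]
  simp only [List.nil_append, Nat.zero_add, pvMatches_eq]
  obtain ⟨init, last, hms⟩ :=
    (List.eq_nil_or_concat (pvMatches token index)).resolve_left (matches_ne_nil token index hp)
  rw [List.concat_eq_append] at hms
  rw [hms, flatMap_eq_fmt_or _ (by simp), PySem.List.pop?_last, PySem.List.pyGet?_neg_one]
  simp only [PySem.List.slice_to_neg_one, List.getLast?_concat, List.dropLast_concat,
    List.foldl_reverse]
  rw [range_append_eq_replicate, b_foldr_eq]
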